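-- pv_equiv track=rewrite | github.com/choeunhak/TIL | Algorithm/pythoncode/programmers/kakao/[2022]parking_price.py | solution
-- ===== SOURCE A (Python) =====
-- import math
--
-- def minTofullMin(minute):
--     fullMin = int(minute[0:2])*60+int(minute[3:5])
--     return fullMin
--
-- def solution(fees, records):
--     answer = []
--     car={}
--     tmp={}
--     for r in records:
--         if(r[6:10] in tmp):
--             if(r[6:10] in car):
--                 car[r[6:10]] = car[r[6:10]]+minTofullMin(r[0:5])-tmp[r[6:10]]
--             else:
--                 car[r[6:10]] = minTofullMin(r[0:5])-tmp[r[6:10]]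
--             del tmp[r[6:10]]
--         else:
--             tmp[r[6:10]]=minTofullMin(r[0:5])
--     for rest in tmp:
--         if(rest in car):
--             car[rest] = car[rest]+minTofullMin("23:59")-tmp[rest]
--         else:
--             car[rest] = minTofullMin("23:59")-tmp[rest]
--
--     car = sorted(car.items())
--
--     for c in car:
--         if(c[1]<=fees[0]):
--             answer.append(fees[1])
--         else:
--             tmp = fees[1]+math.ceil((c[1]-fees[0])/fees[2])*fees[3]
--             answer.append(tmp)
--     return answer
-- ===== SOURCE B (Python) =====
-- import math
--
--
-- def minTofullMin(minute):
--     return int(minute[0:2]) * 60 + int(minute[3:5])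
--
--
-- def solution(fees, records):
--     # group every event time by car id, then settle each car once:
--     # an entry/exit flag pairs consecutive times, an unmatched entry is open until 23:59
--     events = {}
--     for r in records:
--         events.setdefault(r[6:10], []).append(minTofullMin(r[0:5]))
--     answer = []
--     for c in sorted(events):
--         total = 0
--         entry = None
--         for t in events[c]:
--             if entry is None:
--                 entry = t
--             else:
--                 total += t - entry
--                 entry = None
--         if entry is not None:
--             total += 1439 - entry
--         if total <= fees[0]:
--             answer.append(fees[1])
--         else:
--             answer.append(fees[1] + math.ceil((total - fees[0]) / fees[2]) * fees[3])
--     return answer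
-- ===== Notes on version B (the rewrite author's own statement) =====
-- stated objective: simpler
-- what changed: B replaces A's two running dicts (tmp for open entries, car for accumulated totals, with inserts/deletes per record) by one grouping pass (car -> list of event times) followed by a single entry/exit pairing fold per car; the fee formula is unchanged.
import Mathlib
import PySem

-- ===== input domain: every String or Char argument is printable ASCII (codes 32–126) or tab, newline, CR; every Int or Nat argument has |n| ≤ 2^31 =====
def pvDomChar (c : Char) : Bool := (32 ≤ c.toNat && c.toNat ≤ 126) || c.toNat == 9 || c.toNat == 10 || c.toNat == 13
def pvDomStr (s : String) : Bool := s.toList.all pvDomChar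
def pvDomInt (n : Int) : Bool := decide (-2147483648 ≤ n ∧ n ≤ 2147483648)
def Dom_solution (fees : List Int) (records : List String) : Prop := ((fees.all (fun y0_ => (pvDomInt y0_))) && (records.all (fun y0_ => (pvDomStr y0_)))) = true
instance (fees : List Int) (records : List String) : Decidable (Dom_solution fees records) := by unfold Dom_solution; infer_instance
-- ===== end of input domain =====

-- B groups all event times per car in one dict and settles each car with a single entry/exit
-- pairing pass, replacing A's two running dicts with insert/delete traffic (objective: simpler).
-- math.ceil((total-fees[0])/fees[2]) is ported as the exact integer ceiling -((-x)//y), equal to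
-- Python's float ceil whenever |total - fees[0]| < 2^53 (always, for the times parsed here).

-- ===== PORT A =====
-- helper minTofullMin from the source (shared by both Pythons verbatim);
-- int(...) raises ValueError where ofStr? is none — those inputs are outside Pre_, getD 0 is unreachable there
def pvMinTofullMin (minute : String) : Int :=
  (PySem.Int.ofStr? (PySem.Str.slice minute (some 0) (some 2))).getD 0 * 60 +
  (PySem.Int.ofStr? (PySem.Str.slice minute (some 3) (some 5))).getD 0

def pvKey (r : String) : String := PySem.Str.slice r (some 6) (some 10)     -- r[6:10]
def pvTime (r : String) : Int := pvMinTofullMin (PySem.Str.slice r (some 0) (some 5))  -- minTofullMin(r[0:5])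

-- one step of A's first loop over records, state = (car, tmp); car[k]/tmp[k] reads are guarded
-- by the contains tests, so getD 0 is exact
def pvStepA (st : PySem.Dict String Int × PySem.Dict String Int) (r : String) :
    PySem.Dict String Int × PySem.Dict String Int :=
  if st.2.contains (pvKey r) then
    (st.1.insert (pvKey r)
      (if st.1.contains (pvKey r) then st.1.getD (pvKey r) 0 + pvTime r - st.2.getD (pvKey r) 0
       else pvTime r - st.2.getD (pvKey r) 0),
     st.2.erase (pvKey r))
  else
    (st.1, st.2.insert (pvKey r) (pvTime r))

-- one step of A's second loop ('for rest in tmp'), iterating tmp's items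
def pvStepRest (car : PySem.Dict String Int) (p : String × Int) : PySem.Dict String Int :=
  car.insert p.1
    (if car.contains p.1 then car.getD p.1 0 + pvMinTofullMin "23:59" - p.2
     else pvMinTofullMin "23:59" - p.2)

def solution (fees : List Int) (records : List String) : List Int :=
  let st := records.foldl pvStepA (PySem.Dict.empty, PySem.Dict.empty)
  let car2 := st.2.items.foldl pvStepRest st.1
  let carSorted := PySem.List.sorted2 car2.items (fun p => p.1) (fun p => p.2) false
  carSorted.foldl (fun answer c =>
    if c.2 ≤ PySem.List.pyGetD fees 0 0 then answer ++ [PySem.List.pyGetD fees 1 0]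
    else answer ++ [PySem.List.pyGetD fees 1 0 +
      (-(PySem.Int.floordiv (-(c.2 - PySem.List.pyGetD fees 0 0)) (PySem.List.pyGetD fees 2 0))) *
        PySem.List.pyGetD fees 3 0]) []

-- ===== PORT B =====
def solution_alt (fees : List Int) (records : List String) : List Int :=
  let events := records.foldl
    (fun (d : PySem.Dict String (List Int)) r => d.modify (pvKey r) [] (fun l => l ++ [pvTime r]))
    PySem.Dict.empty
  (PySem.List.sorted events.keys (fun k => k) false).foldl (fun answer c =>
    let res := (events.getD c []).foldl
      (fun (st : Int × Option Int) t =>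
        match st.2 with
        | none => (st.1, some t)
        | some e => (st.1 + t - e, none)) (0, none)
    let total := match res.2 with
      | some e => res.1 + (1439 - e)
      | none => res.1
    if total ≤ PySem.List.pyGetD fees 0 0 then answer ++ [PySem.List.pyGetD fees 1 0]
    else answer ++ [PySem.List.pyGetD fees 1 0 +
      (-(PySem.Int.floordiv (-(total - PySem.List.pyGetD fees 0 0)) (PySem.List.pyGetD fees 2 0))) *
        PySem.List.pyGetD fees 3 0]) []

-- ===== PRECONDITION & SPEC =====
-- sum of exit-entry differences over consecutive pairs; a trailing unmatched entry is ignored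
def pvPairSum : List Int → Int
  | [] => 0
  | [_] => 0
  | a :: b :: t => (b - a) + pvPairSum t

-- the unmatched trailing entry (some e iff the list has odd length, e its last element)
def pvOddEntry : List Int → Option Int
  | [] => none
  | [a] => some a
  | _ :: _ :: t => pvOddEntry t

-- a car's total parking time from its event-time list
def pvTotal (ts : List Int) : Int :=
  pvPairSum ts + (match pvOddEntry ts with | some e => 1439 - e | none => 0)

-- the event times of car k, in record order
def pvTsOf (l : List String) (k : String) : List Int :=
  (l.filter (fun r => pvKey r == k)).map pvTime

-- A raises ValueError when int(r[0:2]) or int(r[3:5]) fails for some record; with a nonempty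
-- record list it always reads fees[0] and fees[1] (IndexError if missing), and it reads fees[2]
-- and fees[3] (IndexError) and divides by fees[2] (ZeroDivisionError) exactly when some car's
-- total exceeds the free threshold fees[0]. Pre_ states exactly that return domain, using the
-- declarative per-car total pvTotal/pvTsOf defined above (not the ports' loops).
def Pre_solution (fees : List Int) (records : List String) : Prop :=
  (∀ r ∈ records,
    (PySem.Int.ofStr? (PySem.Str.slice r (some 0) (some 2))).isSome = true ∧
    (PySem.Int.ofStr? (PySem.Str.slice r (some 3) (some 5))).isSome = true) ∧
  (records = [] ∨
    (2 ≤ fees.length ∧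
      ((∀ k ∈ records.map pvKey, pvTotal (pvTsOf records k) ≤ fees.getD 0 0) ∨
        (4 ≤ fees.length ∧ fees.getD 2 0 ≠ 0))))
instance (fees : List Int) (records : List String) : Decidable (Pre_solution fees records) := by
  unfold Pre_solution; infer_instance

def pvWitness_solution : List Int × List String :=
  ([180, 5000, 10, 600], ["05:34 5961 IN", "06:00 0000 IN", "06:34 5961 OUT", "07:59 5961 IN"])

def Spec_solution (fees : List Int) (records : List String) (out : List Int) : Prop := out = solution_alt fees records
instance (fees : List Int) (records : List String) (out : List Int) : Decidable (Spec_solution fees records out) := by unfold Spec_solution; infer_instance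

-- ===== CLAIM (what is proved, stated in full; the proofs are below) =====
def Claim_equal_solution : Prop := ∀ (fees : List Int) (records : List String), Dom_solution fees records → Pre_solution fees records → Spec_solution fees records (solution fees records)

-- ===== LEMMAS AND PROOFS =====

theorem pvMin2359 : pvMinTofullMin "23:59" = 1439 := by decide

theorem pvOddEntry_append (ts : List Int) (t : Int) :
    pvOddEntry (ts ++ [t]) = (match pvOddEntry ts with | none => some t | some _ => none) := by
  induction ts using pvOddEntry.induct with
  | case1 => simp [pvOddEntry]
  | case2 a => simp [pvOddEntry]
  | case3 a b t' ih => simpa [pvOddEntry] using ih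

theorem pvPairSum_append (ts : List Int) (t : Int) :
    pvPairSum (ts ++ [t]) = pvPairSum ts + (match pvOddEntry ts with | some e => t - e | none => 0) := by
  induction ts using pvOddEntry.induct with
  | case1 => simp [pvPairSum, pvOddEntry]
  | case2 a => simp [pvPairSum, pvOddEntry]
  | case3 a b t' ih =>
    simp [pvPairSum, pvOddEntry, ih]
    cases pvOddEntry t' <;> simp <;> ring

-- erase: a first-match lookup over the filtered items
theorem pv_get?_erase (d : PySem.Dict String Int) (k k' : String) :
    (d.erase k).get? k' = if k' = k then none else d.get? k' := by
  rcases d with ⟨items⟩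
  simp only [PySem.Dict.erase, PySem.Dict.get?]
  induction items with
  | nil => simp
  | cons p rest ih =>
    by_cases hpk : p.1 = k
    · by_cases hk : k' = k
      · simp_all [List.find?, beq_iff_eq]
      · have h1 : (k == k') = false := beq_eq_false_iff_ne.mpr (fun h => hk h.symm)
        simp_all [List.find?, beq_iff_eq]
        split <;> simp_all
    · by_cases hpk' : p.1 = k' <;> by_cases hk : k' = k <;>
        simp_all [List.find?_cons, beq_iff_eq, hpk, hpk', hk, ih]

theorem pv_nodup_keys_erase (d : PySem.Dict String Int) (k : String)
    (h : d.keys.Nodup) : (d.erase k).keys.Nodup := by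
  rcases d with ⟨items⟩
  simp only [PySem.Dict.erase, PySem.Dict.keys] at *
  exact (List.filter_sublist.map _).nodup h

theorem pvPairSum_short (ts : List Int) (h : ts.length ≤ 1) : pvPairSum ts = 0 := by
  match ts, h with
  | [], _ => rfl
  | [a], _ => rfl

theorem pvOddEntry_none_len (ts : List Int) (h : pvOddEntry ts = none) :
    ts = [] ∨ 2 ≤ ts.length := by
  induction ts using pvOddEntry.induct with
  | case1 => left; rfl
  | case2 a => simp [pvOddEntry] at h
  | case3 a b t ih => right; simp

theorem pvOddEntry_some_len (ts : List Int) (e : Int) (h : pvOddEntry ts = some e) :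
    1 ≤ ts.length := by
  cases ts with
  | nil => simp [pvOddEntry] at h
  | cons a t => simp

-- invariant of A's first loop
theorem pvLoopA (l : List String) :
    (∀ k, (l.foldl pvStepA (PySem.Dict.empty, PySem.Dict.empty)).2.get? k = pvOddEntry (pvTsOf l k)) ∧
    (∀ k, (l.foldl pvStepA (PySem.Dict.empty, PySem.Dict.empty)).1.get? k =
      if (pvTsOf l k).length ≤ 1 then none else some (pvPairSum (pvTsOf l k))) ∧
    (l.foldl pvStepA (PySem.Dict.empty, PySem.Dict.empty)).1.keys.Nodup ∧
    (l.foldl pvStepA (PySem.Dict.empty, PySem.Dict.empty)).2.keys.Nodup := by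
  induction l using List.reverseRecOn with
  | nil =>
    refine ⟨?_, ?_, ?_, ?_⟩ <;>
      simp [pvTsOf, pvOddEntry, PySem.Dict.get?_empty, PySem.Dict.keys_empty, PySem.Dict.empty,
        PySem.Dict.get?, PySem.Dict.keys]
  | append_singleton l r ih =>
    obtain ⟨ih1, ih2, ih3, ih4⟩ := ih
    have hts : ∀ k, pvTsOf (l ++ [r]) k =
        pvTsOf l k ++ (if pvKey r == k then [pvTime r] else []) := by
      intro k
      simp [pvTsOf, List.filter_append, List.filter_cons]
      split <;> simp
    have htsk : pvTsOf (l ++ [r]) (pvKey r) = pvTsOf l (pvKey r) ++ [pvTime r] := by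
      rw [hts]; simp
    have htsne : ∀ k, k ≠ pvKey r → pvTsOf (l ++ [r]) k = pvTsOf l k := by
      intro k hk
      rw [hts]
      have : (pvKey r == k) = false := beq_eq_false_iff_ne.mpr (fun h => hk h.symm)
      simp [this]
    rw [List.foldl_append]
    set st := l.foldl pvStepA (PySem.Dict.empty, PySem.Dict.empty) with hst
    simp only [List.foldl_cons, List.foldl_nil]
    cases hodd : pvOddEntry (pvTsOf l (pvKey r)) with
    | none =>
      have hcont : st.2.contains (pvKey r) = false := by
        rw [PySem.Dict.contains_eq_isSome_get?, ih1, hodd]; rfl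
      simp only [pvStepA, hcont, Bool.false_eq_true, if_false]
      refine ⟨?_, ?_, ih3, PySem.Dict.nodup_keys_insert _ _ _ ih4⟩
      · intro k
        by_cases hk : k = pvKey r
        · subst hk
          rw [PySem.Dict.get?_insert_self, htsk, pvOddEntry_append, hodd]
        · rw [PySem.Dict.get?_insert_of_ne _ _ hk, ih1, htsne k hk]
      · intro k
        by_cases hk : k = pvKey r
        · subst hk
          rw [htsk, ih2]
          rcases pvOddEntry_none_len _ hodd with hnil | hlen
          · simp [hnil, pvPairSum]
          · have h1 : ¬ ((pvTsOf l (pvKey r)).length ≤ 1) := by omega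
            have h2 : ¬ ((pvTsOf l (pvKey r) ++ [pvTime r]).length ≤ 1) := by
              simp only [List.length_append, List.length_cons, List.length_nil]; omega
            rw [if_neg h1, if_neg h2, pvPairSum_append, hodd]
            simp
        · rw [ih2, htsne k hk]
    | some e =>
      have hcont : st.2.contains (pvKey r) = true := by
        rw [PySem.Dict.contains_eq_isSome_get?, ih1, hodd]; rfl
      simp only [pvStepA, hcont, if_true]
      refine ⟨?_, ?_, PySem.Dict.nodup_keys_insert _ _ _ ih3, pv_nodup_keys_erase _ _ ih4⟩
      · intro k
        by_cases hk : k = pvKey r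
        · subst hk
          rw [pv_get?_erase, if_pos rfl, htsk, pvOddEntry_append, hodd]
        · rw [pv_get?_erase, if_neg hk, ih1, htsne k hk]
      · intro k
        by_cases hk : k = pvKey r
        · subst hk
          rw [PySem.Dict.get?_insert_self, htsk]
          have hlen1 : 1 ≤ (pvTsOf l (pvKey r)).length := pvOddEntry_some_len _ _ hodd
          have h2 : ¬ ((pvTsOf l (pvKey r) ++ [pvTime r]).length ≤ 1) := by
            simp only [List.length_append, List.length_cons, List.length_nil]; omega
          rw [if_neg h2, pvPairSum_append, hodd]
          have htmpv : st.2.getD (pvKey r) 0 = e := by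
            rw [PySem.Dict.getD_eq_get?_getD, ih1, hodd]; rfl
          by_cases hlen : (pvTsOf l (pvKey r)).length ≤ 1
          · have hcar : st.1.contains (pvKey r) = false := by
              rw [PySem.Dict.contains_eq_isSome_get?, ih2, if_pos hlen]; rfl
            simp only [hcar, Bool.false_eq_true, if_false, htmpv]
            rw [pvPairSum_short _ hlen]
            refine congrArg some ?_; ring
          · have hcar : st.1.contains (pvKey r) = true := by
              rw [PySem.Dict.contains_eq_isSome_get?, ih2, if_neg hlen]; rfl
            have hcarv : st.1.getD (pvKey r) 0 = pvPairSum (pvTsOf l (pvKey r)) := by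
              rw [PySem.Dict.getD_eq_get?_getD, ih2, if_neg hlen]; rfl
            simp only [hcar, if_true, htmpv, hcarv]
            refine congrArg some ?_; ring
        · rw [PySem.Dict.get?_insert_of_ne _ _ hk, ih2, htsne k hk]

-- A's second loop, over a pair list with distinct keys
theorem pvLoopRest_get?_of_not_mem (ps : List (String × Int)) (car : PySem.Dict String Int)
    (k : String) (hk : k ∉ ps.map Prod.fst) :
    (ps.foldl pvStepRest car).get? k = car.get? k := by
  induction ps generalizing car with
  | nil => rfl
  | cons p ps ih =>
    simp only [List.map_cons, List.mem_cons, not_or] at hk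
    simp only [List.foldl_cons]
    rw [ih _ hk.2, pvStepRest, PySem.Dict.get?_insert_of_ne _ _ (fun h => hk.1 h)]
theorem pvLoopRest_get? (ps : List (String × Int)) (car : PySem.Dict String Int) (k : String)
    (hnd : (ps.map Prod.fst).Nodup) :
    (ps.foldl pvStepRest car).get? k =
      match ps.find? (fun p => p.1 == k) with
      | some p => some (car.getD k 0 + 1439 - p.2)
      | none => car.get? k := by
  induction ps generalizing car with
  | nil => rfl
  | cons p ps ih =>
    simp only [List.map_cons, List.nodup_cons] at hnd
    by_cases hpk : p.1 = k
    · subst hpk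
      simp only [List.foldl_cons, List.find?_cons, beq_self_eq_true]
      rw [pvLoopRest_get?_of_not_mem _ _ _ hnd.1]
      rw [pvStepRest, PySem.Dict.get?_insert_self]
      by_cases hc : car.contains p.1
      · simp [hc, pvMin2359]
      · rw [PySem.Dict.getD_of_not_contains _ _ (by simp [hc])]
        simp [hc, pvMin2359]
    · have hb : (p.1 == k) = false := beq_eq_false_iff_ne.mpr hpk
      simp only [List.foldl_cons, List.find?_cons, hb]
      rw [ih _ hnd.2]
      have h1 : (pvStepRest car p).getD k 0 = car.getD k 0 := by
        rw [pvStepRest, PySem.Dict.getD_eq_get?_getD, PySem.Dict.getD_eq_get?_getD,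
          PySem.Dict.get?_insert_of_ne _ _ (fun h => hpk h.symm)]
        rfl
      have h2 : (pvStepRest car p).get? k = car.get? k := by
        rw [pvStepRest, PySem.Dict.get?_insert_of_ne _ _ (fun h => hpk h.symm)]
      cases ps.find? (fun q => q.1 == k) <;> simp [h1, h2]

-- B's inner pairing loop computes pvPairSum / pvOddEntry
def pvStepB (st : Int × Option Int) (t : Int) : Int × Option Int :=
  match st.2 with
  | none => (st.1, some t)
  | some e => (st.1 + t - e, none)

def pvPend : Option Int → List Int → List Int
  | none, ts => ts
  | some e, ts => e :: ts

theorem pvLoopB_gen (ts : List Int) (st : Int × Option Int) :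
    ts.foldl pvStepB st = (st.1 + pvPairSum (pvPend st.2 ts), pvOddEntry (pvPend st.2 ts)) := by
  induction ts generalizing st with
  | nil => rcases st with ⟨a, e⟩; cases e <;> simp [pvPend, pvPairSum, pvOddEntry]
  | cons t ts ih =>
    rcases st with ⟨a, e⟩
    cases e with
    | none => simp [pvStepB, pvPend, ih]
    | some e0 =>
      simp [pvStepB, pvPend, ih, pvPairSum, pvOddEntry]
      ring

-- sorted2 with pairwise-injective first key is sorted by the first key
theorem pvInsertBy_congr (b1 b2 : (String × Int) → (String × Int) → Bool) (x : String × Int)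
    (ys : List (String × Int)) (h : ∀ y ∈ ys, b1 x y = b2 x y) :
    PySem.List.insertBy b1 x ys = PySem.List.insertBy b2 x ys := by
  induction ys with
  | nil => rfl
  | cons y ys ih =>
    simp only [PySem.List.insertBy, h y (by simp)]
    by_cases hb : b2 x y = true
    · simp [hb]
    · simp only [Bool.not_eq_true] at hb
      simp [hb]
      have := ih (fun z hz => h z (by simp [hz]))
      simpa [PySem.List.insertBy] using this
theorem pvFoldl_insertBy_congr (b1 b2 : (String × Int) → (String × Int) → Bool)
    (xs acc : List (String × Int))
    (h : ∀ a, ∀ b, (a ∈ acc ∨ a ∈ xs) → (b ∈ acc ∨ b ∈ xs) → b1 a b = b2 a b) :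
    xs.foldl (fun ac x => PySem.List.insertBy b1 x ac) acc =
    xs.foldl (fun ac x => PySem.List.insertBy b2 x ac) acc := by
  induction xs generalizing acc with
  | nil => rfl
  | cons x xs ih =>
    simp only [List.foldl_cons]
    rw [pvInsertBy_congr b1 b2 x acc (fun y hy => h x y (by simp) (Or.inl hy))]
    apply ih
    intro a b ha hb
    apply h a b
    · rcases ha with ha | ha
      · rcases (PySem.List.mem_insertBy b2 x a acc).mp ha with h' | h'
        · right; simp [h']
        · left; exact h'
      · right; simp [ha]
    · rcases hb with hb | hb
      · rcases (PySem.List.mem_insertBy b2 x b acc).mp hb with h' | h'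
        · right; simp [h']
        · left; exact h'
      · right; simp [hb]
theorem pvSorted2_eq_sorted_fst (xs : List (String × Int))
    (hnd : (xs.map Prod.fst).Nodup) :
    PySem.List.sorted2 xs (fun p => p.1) (fun p => p.2) false =
    PySem.List.sorted xs (fun p => p.1) false := by
  simp only [PySem.List.sorted2, PySem.List.sorted, Bool.false_eq_true, if_false]
  apply pvFoldl_insertBy_congr
  intro a b ha hb
  simp only [List.mem_nil_iff, false_or] at ha hb
  by_cases heq : a.1 = b.1
  · have : a = b := List.inj_on_of_nodup_map hnd ha hb heq
    subst this
    simp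
  · rcases lt_or_gt_of_ne heq with hlt | hgt
    · simp [hlt, le_of_lt hlt]
    · simp [hgt, not_lt_of_gt hgt, not_lt.mpr (le_of_lt hgt)]

-- the fee formula applied to one car's total
def pvFee (fees : List Int) (v : Int) : Int :=
  if v ≤ PySem.List.pyGetD fees 0 0 then PySem.List.pyGetD fees 1 0
  else PySem.List.pyGetD fees 1 0 +
    (-(PySem.Int.floordiv (-(v - PySem.List.pyGetD fees 0 0)) (PySem.List.pyGetD fees 2 0))) *
      PySem.List.pyGetD fees 3 0

theorem pvTs_ne_nil_iff (l : List String) (k : String) :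
    pvTsOf l k ≠ [] ↔ k ∈ l.map pvKey := by
  simp [pvTsOf, List.filter_eq_nil_iff, List.mem_map]

theorem pvNe_nil_parts (ts : List Int) :
    ts ≠ [] ↔ (2 ≤ ts.length ∨ (pvOddEntry ts).isSome = true) := by
  induction ts using pvOddEntry.induct with
  | case1 => simp [pvOddEntry]
  | case2 a => simp [pvOddEntry]
  | case3 a b t ih => simp [pvOddEntry]

-- B's value: sorted car ids, each fee computed from the grouped times
theorem pvB_eq (fees : List Int) (records : List String) :
    solution_alt fees records =
      (PySem.List.sorted (PySem.Set.ofList (records.map pvKey)) (fun k => k) false).map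
        (fun k => pvFee fees (pvTotal (pvTsOf records k))) := by
  have hkeys : (records.foldl
      (fun (d : PySem.Dict String (List Int)) r => d.modify (pvKey r) [] (fun l => l ++ [pvTime r]))
      PySem.Dict.empty).keys = PySem.Set.ofList (records.map pvKey) := by
    have h := PySem.Dict.keys_foldl_modify_key (ν := List Int) records pvKey []
      (fun _ r => fun l => l ++ [pvTime r]) PySem.Dict.empty
    rw [PySem.Dict.keys_empty] at h
    exact h
  have hget : ∀ c, (records.foldl
      (fun (d : PySem.Dict String (List Int)) r => d.modify (pvKey r) [] (fun l => l ++ [pvTime r]))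
      PySem.Dict.empty).getD c [] = pvTsOf records c := by
    intro c
    have h := PySem.Dict.getD_foldl_modify_append
      (records.map (fun r => (pvKey r, pvTime r))) PySem.Dict.empty c
    rw [List.foldl_map] at h
    rw [h, List.filter_map, List.map_map]
    simp [pvTsOf, Function.comp_def]
  have hstep : (fun (st : Int × Option Int) (t : Int) =>
      match st.2 with
      | none => (st.1, some t)
      | some e => (st.1 + t - e, none)) = pvStepB := rfl
  show (PySem.List.sorted _ (fun k => k) false).foldl _ [] = _
  rw [hkeys]
  have hbody : ∀ (ans : List Int) (c : String),
      (let res := ((records.foldl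
          (fun (d : PySem.Dict String (List Int)) r => d.modify (pvKey r) [] (fun l => l ++ [pvTime r]))
          PySem.Dict.empty).getD c []).foldl
        (fun (st : Int × Option Int) t =>
          match st.2 with
          | none => (st.1, some t)
          | some e => (st.1 + t - e, none)) (0, none)
       let total := match res.2 with
         | some e => res.1 + (1439 - e)
         | none => res.1
       if total ≤ PySem.List.pyGetD fees 0 0 then ans ++ [PySem.List.pyGetD fees 1 0]
       else ans ++ [PySem.List.pyGetD fees 1 0 +
         (-(PySem.Int.floordiv (-(total - PySem.List.pyGetD fees 0 0)) (PySem.List.pyGetD fees 2 0))) *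
           PySem.List.pyGetD fees 3 0]) = ans ++ [pvFee fees (pvTotal (pvTsOf records c))] := by
    intro ans c
    rw [hstep, hget c, pvLoopB_gen]
    have hp : pvPend (0, (none : Option Int)).2 (pvTsOf records c) = pvTsOf records c := rfl
    rw [hp]
    cases hodd : pvOddEntry (pvTsOf records c) <;>
      simp [pvFee, pvTotal, hodd] <;> split <;> ring_nf
  calc (PySem.List.sorted (PySem.Set.ofList (records.map pvKey)) (fun k => k) false).foldl _ [] =
      (PySem.List.sorted (PySem.Set.ofList (records.map pvKey)) (fun k => k) false).foldl
        (fun ans c => ans ++ [pvFee fees (pvTotal (pvTsOf records c))]) [] := by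
        apply List.foldl_ext
        intro a x _
        exact hbody a x
    _ = _ := by rw [PySem.List.foldl_append_singleton_eq_map]; simp

-- A's value: the same list
theorem pvA_eq (fees : List Int) (records : List String) :
    solution fees records =
      (PySem.List.sorted (PySem.Set.ofList (records.map pvKey)) (fun k => k) false).map
        (fun k => pvFee fees (pvTotal (pvTsOf records k))) := by
  obtain ⟨h1, h2, h3, h4⟩ := pvLoopA records
  set st := records.foldl pvStepA (PySem.Dict.empty, PySem.Dict.empty) with hst
  set car2 := st.2.items.foldl pvStepRest st.1 with hcar2def
  have hrest : st.2.items.foldl pvStepRest st.1 =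
      st.2.items.foldl (fun (d : PySem.Dict String Int) (x : String × Int) => d.insert x.1
        (if d.contains x.1 then d.getD x.1 0 + pvMinTofullMin "23:59" - x.2
         else pvMinTofullMin "23:59" - x.2)) st.1 := rfl
  have hndfst : (st.2.items.map Prod.fst).Nodup := h4
  have hc2get : ∀ k, car2.get? k =
      match st.2.get? k with
      | some e => some (st.1.getD k 0 + 1439 - e)
      | none => st.1.get? k := by
    intro k
    rw [hcar2def, pvLoopRest_get? _ _ _ hndfst]
    cases hf : List.find? (fun p => p.1 == k) st.2.items <;>
      simp [PySem.Dict.get?, hf]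
  have hval : ∀ k, k ∈ records.map pvKey → car2.getD k 0 = pvTotal (pvTsOf records k) := by
    intro k hk
    have hne : pvTsOf records k ≠ [] := (pvTs_ne_nil_iff records k).mpr hk
    rw [PySem.Dict.getD_eq_get?_getD, hc2get k, h1 k]
    cases hodd : pvOddEntry (pvTsOf records k) with
    | some e =>
      rw [PySem.Dict.getD_eq_get?_getD, h2 k]
      by_cases hlen : (pvTsOf records k).length ≤ 1
      · rw [if_pos hlen]
        simp [pvTotal, hodd, pvPairSum_short _ hlen]
      · rw [if_neg hlen]
        simp [pvTotal, hodd]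
        ring
    | none =>
      rw [h2 k]
      have hlen : 2 ≤ (pvTsOf records k).length := by
        rcases pvOddEntry_none_len _ hodd with hnil | hl
        · exact absurd hnil hne
        · exact hl
      rw [if_neg (by omega)]
      simp [pvTotal, hodd]
  have hkeys2 : car2.keys = PySem.Set.update st.1.keys (st.2.items.map (fun x => x.1)) := by
    rw [hcar2def, hrest]
    exact PySem.Dict.keys_foldl_insert_key st.2.items (fun x => x.1) _ st.1
  have hnd2 : car2.keys.Nodup := by
    rw [hcar2def, hrest]
    exact PySem.Dict.nodup_keys_foldl_insert_key st.2.items (fun x => x.1) _ st.1 h3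
  have hmem : ∀ k, k ∈ car2.keys ↔ k ∈ records.map pvKey := by
    intro k
    rw [hkeys2, PySem.Set.mem_update]
    rw [← pvTs_ne_nil_iff records k, pvNe_nil_parts]
    have e1 : k ∈ st.1.keys ↔ ¬ (pvTsOf records k).length ≤ 1 := by
      rw [← PySem.Dict.contains_iff_mem_keys, PySem.Dict.contains_eq_isSome_get?, h2 k]
      by_cases hlen : (pvTsOf records k).length ≤ 1 <;> simp [hlen]
    have e2 : k ∈ st.2.items.map (fun x => x.1) ↔ (pvOddEntry (pvTsOf records k)).isSome = true := by
      have : k ∈ st.2.items.map (fun x => x.1) ↔ k ∈ st.2.keys := Iff.rfl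
      rw [this, ← PySem.Dict.contains_iff_mem_keys, PySem.Dict.contains_eq_isSome_get?, h1 k]
    rw [e1, e2]
    constructor
    · rintro (h | h)
      · left; omega
      · right; exact h
    · rintro (h | h)
      · left; omega
      · right; exact h
  have hitems : car2.items = car2.keys.map (fun k => (k, car2.getD k 0)) :=
    PySem.Dict.items_eq_map_keys car2 hnd2 0
  have hndS : (PySem.Set.ofList (records.map pvKey) : List String).Nodup :=
    PySem.Set.nodup_ofList _
  have hpk : (PySem.List.sorted (PySem.Set.ofList (records.map pvKey)) (fun k => k) false).Perm
      car2.keys := by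
    refine (PySem.List.sorted_perm _ _ _).trans ?_
    rw [List.perm_ext_iff_of_nodup hndS hnd2]
    intro a
    rw [hmem a, PySem.Set.mem_ofList]
  have hysperm : ((PySem.List.sorted (PySem.Set.ofList (records.map pvKey)) (fun k => k) false).map
      (fun k => (k, car2.getD k 0))).Perm car2.items := by
    rw [hitems]
    exact hpk.map _
  have hpair : ((PySem.List.sorted (PySem.Set.ofList (records.map pvKey)) (fun k => k) false).map
      (fun k => (k, car2.getD k 0))).Pairwise (fun a b => a.1 < b.1) := by
    rw [List.pairwise_map]
    exact PySem.List.sorted_ofList_pairwise_lt (records.map pvKey)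
  have hs2 : PySem.List.sorted2 car2.items (fun p => p.1) (fun p => p.2) false =
      (PySem.List.sorted (PySem.Set.ofList (records.map pvKey)) (fun k => k) false).map
        (fun k => (k, car2.getD k 0)) := by
    rw [pvSorted2_eq_sorted_fst car2.items hnd2]
    exact PySem.List.sorted_eq_of_perm_of_pairwise_lt _ _ _ hysperm hpair
  show (PySem.List.sorted2 car2.items (fun p => p.1) (fun p => p.2) false).foldl
      (fun answer c =>
        if c.2 ≤ PySem.List.pyGetD fees 0 0 then answer ++ [PySem.List.pyGetD fees 1 0]
        else answer ++ [PySem.List.pyGetD fees 1 0 +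
          (-(PySem.Int.floordiv (-(c.2 - PySem.List.pyGetD fees 0 0)) (PySem.List.pyGetD fees 2 0))) *
            PySem.List.pyGetD fees 3 0]) [] = _
  rw [hs2]
  have hbody : ∀ (ans : List Int) (c : String × Int),
      (if c.2 ≤ PySem.List.pyGetD fees 0 0 then ans ++ [PySem.List.pyGetD fees 1 0]
       else ans ++ [PySem.List.pyGetD fees 1 0 +
         (-(PySem.Int.floordiv (-(c.2 - PySem.List.pyGetD fees 0 0)) (PySem.List.pyGetD fees 2 0))) *
           PySem.List.pyGetD fees 3 0]) = ans ++ [pvFee fees c.2] := by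
    intro ans c
    rw [pvFee]
    split <;> rfl
  calc ((PySem.List.sorted (PySem.Set.ofList (records.map pvKey)) (fun k => k) false).map
        (fun k => (k, car2.getD k 0))).foldl _ [] =
      ((PySem.List.sorted (PySem.Set.ofList (records.map pvKey)) (fun k => k) false).map
        (fun k => (k, car2.getD k 0))).foldl (fun ans c => ans ++ [pvFee fees c.2]) [] := by
        apply List.foldl_ext
        intro a x _
        exact hbody a x
    _ = _ := by
        rw [PySem.List.foldl_append_singleton_eq_map]
        rw [List.map_map]
        refine List.map_congr_left ?_
        intro k hk
        have hkS : k ∈ records.map pvKey := by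
          have := (PySem.List.sorted_perm (PySem.Set.ofList (records.map pvKey)) (fun k => k) false).mem_iff.mp hk
          exact (PySem.Set.mem_ofList _ _).mp this
        simp [Function.comp_def, hval k hkS]

-- ===== VERDICT (by name: the statement is the Claim_ definition above) =====
theorem solution_spec : Claim_equal_solution := by
  intro fees records _ _
  unfold Spec_solution
  rw [pvA_eq, pvB_eq]
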